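-- pv_equiv track=rewrite | github.com/bharathmrr/Slackbot-Content-Pipeline- | app/outline/extractor.py | _find_common_headings
-- ===== SOURCE A (Python) =====
-- from typing import List, Dict, Any, Optional
--
-- def _find_common_headings(headings: List[str]) -> List[str]:
--     """Find common heading patterns."""
--     if not headings:
--         return []
--
--     # Simple frequency count
--     heading_count = {}
--     for heading in headings:
--         # Normalize heading
--         normalized = heading.lower().strip()
--         heading_count[normalized] = heading_count.get(normalized, 0) + 1
--
--     # Sort by frequency
--     sorted_headings = sorted(heading_count.items(), key=lambda x: x[1], reverse=True)
--
--     # Return headings that appear more than once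
--     return [heading for heading, count in sorted_headings if count > 1]
-- ===== SOURCE B (Python) =====
-- def _find_common_headings(headings):
--     """Find common heading patterns (bucket distribution instead of a comparison sort)."""
--     counts = {}
--     for heading in headings:
--         key = heading.lower().strip()
--         counts[key] = counts.get(key, 0) + 1
--
--     # Distribute normalized headings into frequency buckets (insertion order kept).
--     buckets = {}
--     for key, count in counts.items():
--         buckets.setdefault(count, []).append(key)
--
--     # Emit buckets from the highest count down to 2.
--     result = []
--     for count in range(max(buckets, default=0), 1, -1):
--         result.extend(buckets.get(count, []))
--     return result
-- ===== Notes on version B (the rewrite author's own statement) =====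
-- stated objective: alternative
-- what changed: Replaces sorting the frequency items by count with a counting/bucket pass: items are distributed into count-indexed buckets in insertion order and emitted for counts from the maximum down to 2, so no comparison sort is performed.
import Mathlib
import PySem

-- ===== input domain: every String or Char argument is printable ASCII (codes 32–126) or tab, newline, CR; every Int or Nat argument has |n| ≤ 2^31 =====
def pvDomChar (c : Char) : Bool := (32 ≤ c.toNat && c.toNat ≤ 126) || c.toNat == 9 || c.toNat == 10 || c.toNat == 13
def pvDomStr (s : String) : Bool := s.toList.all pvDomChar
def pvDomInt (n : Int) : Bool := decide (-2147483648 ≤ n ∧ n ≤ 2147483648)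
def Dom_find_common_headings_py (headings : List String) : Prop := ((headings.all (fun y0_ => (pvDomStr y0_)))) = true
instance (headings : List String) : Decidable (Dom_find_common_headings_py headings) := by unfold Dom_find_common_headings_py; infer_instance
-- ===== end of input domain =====

-- B replaces the comparison sort of frequency items by a counting/bucket pass (emit buckets
-- from the maximal count down to 2); same exact output, no speed claim.


-- ===== PORT A =====
def find_common_headings_py (headings : List String) : List String :=
  if headings = [] then []
  else
    let heading_count : PySem.Dict String Int :=
      headings.foldl (fun d heading =>
        let normalized := PySem.Str.strip (PySem.Str.lower heading)
        d.insert normalized (d.getD normalized 0 + 1)) PySem.Dict.empty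
    let sorted_headings := PySem.List.sorted heading_count.items (fun x => x.2) true
    (sorted_headings.filter (fun x => decide (1 < x.2))).map (fun x => x.1)

-- ===== PORT B =====
def find_common_headings_py_alt (headings : List String) : List String :=
  let counts : PySem.Dict String Int :=
    headings.foldl (fun d heading =>
      let key := PySem.Str.strip (PySem.Str.lower heading)
      d.insert key (d.getD key 0 + 1)) PySem.Dict.empty
  let buckets : PySem.Dict Int (List String) :=
    counts.items.foldl (fun b p => b.modify p.2 [] (· ++ [p.1])) PySem.Dict.empty
  (PySem.List.pyRange (PySem.List.maxD buckets.keys (fun c => c) 0) 1 (-1)).foldl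
    (fun res c => res ++ buckets.getD c []) []

-- ===== PRECONDITION & SPEC =====
def Spec_find_common_headings_py (headings : List String) (out : List String) : Prop := out = find_common_headings_py_alt headings
instance (headings : List String) (out : List String) : Decidable (Spec_find_common_headings_py headings out) := by unfold Spec_find_common_headings_py; infer_instance

-- ===== CLAIM (what is proved, stated in full; the proofs are below) =====
def Claim_equal_find_common_headings_py : Prop := ∀ (headings : List String), Dom_find_common_headings_py headings → Spec_find_common_headings_py headings (find_common_headings_py headings)

-- ===== LEMMAS AND PROOFS =====

-- inserting before no element of as keeps as as a prefix
theorem pv_insertBy_all_false {α : Type} (before : α → α → Bool) (x : α) (as bs : List α)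
    (h : ∀ a ∈ as, before x a = false) :
    PySem.List.insertBy before x (as ++ bs) = as ++ PySem.List.insertBy before x bs := by
  induction as with
  | nil => rfl
  | cons a as ih =>
    have ha := h a (by simp)
    simp [PySem.List.insertBy, ha, ih (fun a ha' => h a (by simp [ha']))]

theorem pv_insertBy_all_true {α : Type} (before : α → α → Bool) (x : α) (ys : List α)
    (h : ∀ y ∈ ys, before x y = true) :
    PySem.List.insertBy before x ys = x :: ys := by
  cases ys with
  | nil => rfl
  | cons y ys => simp [PySem.List.insertBy, h y (by simp)]

-- inserting x into a flatMap over strictly-decreasing key groups appends x to its own group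
theorem pv_insertBy_group {α : Type} (key : α → Int) (x : α) (ds : List Int) (g : Int → List α)
    (hg : ∀ c ∈ ds, ∀ y ∈ g c, key y = c)
    (hs : ds.Pairwise (fun a b => b < a)) (hx : key x ∈ ds) :
    PySem.List.insertBy (fun a b => decide (key b < key a)) x (ds.flatMap g)
      = ds.flatMap (fun c => if key x = c then g c ++ [x] else g c) := by
  induction ds with
  | nil => simp at hx
  | cons c ds ih =>
    have hlt : ∀ c' ∈ ds, c' < c := (List.pairwise_cons.mp hs).1
    have hgc : ∀ y ∈ g c, key y = c := hg c (by simp)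
    by_cases hc : key x = c
    · have h1 : ∀ y ∈ g c, (decide (key y < key x)) = false := by
        intro y hy; simp [hgc y hy, hc]
      have h2 : ∀ y ∈ ds.flatMap g, (decide (key y < key x)) = true := by
        intro y hy
        rcases List.mem_flatMap.mp hy with ⟨c', hc', hy'⟩
        have := hg c' (by simp [hc']) y hy'
        simp [this, hc]
        exact hlt c' hc'
      rw [List.flatMap_cons, pv_insertBy_all_false _ _ _ _ h1, pv_insertBy_all_true _ _ _ h2]
      have h3 : ds.flatMap (fun c' => if key x = c' then g c' ++ [x] else g c') = ds.flatMap g := by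
        apply List.flatMap_congr
        intro c' hc'
        have : key x ≠ c' := by have := hlt c' hc'; omega
        simp [this]
      simp only [List.flatMap_cons, if_pos hc, List.cons_append, List.append_assoc, List.nil_append]
      rw [h3]
    · have hx' : key x ∈ ds := (List.mem_cons.mp hx).resolve_left hc
      have hxlt : key x < c := hlt _ hx'
      have h1 : ∀ y ∈ g c, (decide (key y < key x)) = false := by
        intro y hy; simp [hgc y hy]; omega
      rw [List.flatMap_cons, pv_insertBy_all_false _ _ _ _ h1,
        ih (fun c' hc' => hg c' (by simp [hc'])) (List.pairwise_cons.mp hs).2 hx']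
      simp [hc]

-- stable reverse sort by an Int key is a flatMap over the strictly-decreasing list of keys
theorem pv_sorted_rev_group {α : Type} (key : α → Int) (l : List α) (ds : List Int)
    (hmem : ∀ x ∈ l, key x ∈ ds) (hs : ds.Pairwise (fun a b => b < a)) :
    PySem.List.sorted l key true = ds.flatMap (fun c => l.filter (fun x => decide (key x = c))) := by
  induction l using List.reverseRecOn with
  | nil => rw [PySem.List.sorted_rev_eq_foldl_insertBy]; simp
  | append_singleton l x ih =>
    rw [PySem.List.sorted_rev_eq_foldl_insertBy, List.foldl_append, List.foldl_cons, List.foldl_nil,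
      ← PySem.List.sorted_rev_eq_foldl_insertBy,
      ih (fun y hy => hmem y (by simp [hy])),
      pv_insertBy_group key x ds _ (fun c _ y hy => by
        have := List.of_mem_filter hy; simpa using this) hs (hmem x (by simp))]
    apply List.flatMap_congr
    intro c hc
    by_cases hxc : key x = c <;> simp [hxc, List.filter_append]

-- descending range normal form
theorem pv_pyRange_down (b e : Int) (h : e ≤ b) :
    PySem.List.pyRange b e (-1) = (List.range (b - e).toNat).map (fun k : Nat => b - (k : Int)) := by
  simp only [PySem.List.pyRange]
  norm_num
  by_cases h1 : e < b
  · simp only [if_pos h1]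
    norm_num
    intro a _
    ring
  · have hb : b = e := by omega
    simp [hb]

theorem pv_pyRange_split (m : Int) (h : 1 ≤ m) :
    PySem.List.pyRange m 0 (-1) = PySem.List.pyRange m 1 (-1) ++ [1] := by
  rw [pv_pyRange_down m 0 (by omega), pv_pyRange_down m 1 (by omega)]
  have h1 : (m - 0).toNat = (m - 1).toNat + 1 := by omega
  rw [h1, List.range_succ, List.map_append]
  congr 1
  simp only [List.map_cons, List.map_nil]
  congr 1
  omega

theorem pv_mem_pyRange_down (b e c : Int) (h : e ≤ b) :
    c ∈ PySem.List.pyRange b e (-1) ↔ e < c ∧ c ≤ b := by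
  rw [pv_pyRange_down b e h]
  simp only [List.mem_map, List.mem_range]
  constructor
  · rintro ⟨k, hk, rfl⟩; omega
  · intro hc
    exact ⟨(b - c).toNat, by omega, by omega⟩

theorem pv_pairwise_pyRange_down (b e : Int) (h : e ≤ b) :
    (PySem.List.pyRange b e (-1)).Pairwise (fun a b => b < a) := by
  rw [pv_pyRange_down b e h]
  rw [List.pairwise_map]
  exact (List.pairwise_lt_range).imp (by intro i j hij; omega)

-- ===== VERDICT (by name: the statement is the Claim_ definition above) =====
-- a run of equal-key elements passes a strict filter wholesale or not at all
theorem pv_filter_filter_key {c : Int} (items : List (String × Int)) :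
    ((items.filter (fun p => decide (p.2 = c))).filter (fun p => decide (1 < p.2)))
      = if 1 < c then items.filter (fun p => decide (p.2 = c)) else [] := by
  by_cases hc : 1 < c
  · rw [if_pos hc]
    apply List.filter_eq_self.mpr
    intro p hp
    have := List.of_mem_filter hp
    simp at this ⊢
    omega
  · rw [if_neg hc]
    apply List.filter_eq_nil_iff.mpr
    intro p hp
    have := List.of_mem_filter hp
    simp at this ⊢
    omega

theorem find_common_headings_py_spec : Claim_equal_find_common_headings_py := by
  intro headings _
  unfold Spec_find_common_headings_py
  by_cases hnil : headings = []
  · subst hnil; rfl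
  · simp only [find_common_headings_py, find_common_headings_py_alt, if_neg hnil]
    -- the shared counting pass is Counter of the normalized headings
    have hD : headings.foldl
        (fun d heading => d.insert (PySem.Str.strip (PySem.Str.lower heading))
          (d.getD (PySem.Str.strip (PySem.Str.lower heading)) 0 + 1)) PySem.Dict.empty
        = PySem.Dict.counter (headings.map (fun h => PySem.Str.strip (PySem.Str.lower h))) := by
      rw [← PySem.Dict.foldl_insert_getD_add_one_eq_counter, List.foldl_map]
    rw [hD]
    set ns := headings.map (fun h => PySem.Str.strip (PySem.Str.lower h)) with hns
    set items := (PySem.Dict.counter ns).items with hitems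
    set vs := items.map (fun p => p.2) with hvs
    -- the bucket dict: keys and lookups
    have hBfold : items.foldl (fun b p => b.modify p.2 [] (· ++ [p.1])) PySem.Dict.empty
        = (items.map (fun p => (p.2, p.1))).foldl
            (fun b q => b.modify q.1 [] (· ++ [q.2])) PySem.Dict.empty := by
      rw [List.foldl_map]
    have hBget : ∀ c : Int,
        (items.foldl (fun b p => b.modify p.2 [] (· ++ [p.1])) PySem.Dict.empty).getD c []
          = (items.filter (fun p => p.2 == c)).map (fun p => p.1) := by
      intro c
      rw [hBfold, PySem.Dict.getD_foldl_modify_append, PySem.Dict.getD_empty, List.filter_map,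
        List.map_map]
      rfl
    have hBkeys : (items.foldl (fun b p => b.modify p.2 [] (· ++ [p.1])) PySem.Dict.empty).keys
        = PySem.Set.ofList vs := by
      rw [PySem.Dict.keys_foldl_modify_key, PySem.Dict.keys_empty]
      rfl
    -- the count values: all at least 1, vs nonempty
    have hvs_eq : vs = (PySem.Set.ofList ns).map (fun k => ((ns.count k : Int))) := by
      rw [hvs, hitems, PySem.Dict.items_counter, List.map_map]
      rfl
    have hns_ne : ns ≠ [] := by
      simp [hns, hnil]
    have hpos : ∀ v ∈ vs, 1 ≤ v := by
      intro v hv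
      rw [hvs_eq] at hv
      rcases List.mem_map.mp hv with ⟨k, hk, rfl⟩
      have hk' : k ∈ ns := (PySem.Set.mem_ofList _ _).mp hk
      have := List.count_pos_iff.mpr hk'
      omega
    have hvs_ne : vs ≠ [] := by
      rw [hvs_eq]
      rcases List.exists_mem_of_ne_nil ns hns_ne with ⟨a, ha⟩
      exact List.ne_nil_of_mem (List.mem_map_of_mem ((PySem.Set.mem_ofList _ _).mpr ha))
    -- the maximum count
    obtain ⟨mv, hmv⟩ : ∃ mv, PySem.List.max? (PySem.Set.ofList vs) (fun c => c) = some mv := by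
      rcases hcase : PySem.List.max? (PySem.Set.ofList vs) (fun c => c) with _ | mv
      · exfalso
        have := (PySem.List.max?_eq_none_iff _ _).mp hcase
        rcases List.exists_mem_of_ne_nil vs hvs_ne with ⟨a, ha⟩
        exact List.ne_nil_of_mem ((PySem.Set.mem_ofList _ _).mpr ha) this
      · exact ⟨mv, rfl⟩
    have hmaxD : PySem.List.maxD (PySem.Set.ofList vs) (fun c => c) 0 = mv := by
      simp [PySem.List.maxD, hmv]
    have hub : ∀ v ∈ vs, v ≤ mv := by
      intro v hv
      exact PySem.List.max?_isMax hmv v ((PySem.Set.mem_ofList _ _).mpr hv)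
    have hm1 : 1 ≤ mv :=
      hpos mv ((PySem.Set.mem_ofList _ _).mp (PySem.List.max?_mem hmv))
    rw [hBkeys, hmaxD]
    -- A's sort as a flatMap over the strictly-descending count range [mv .. 1]
    have hsorted : PySem.List.sorted items (fun x => x.2) true
        = (PySem.List.pyRange mv 0 (-1)).flatMap
            (fun c => items.filter (fun p => decide (p.2 = c))) := by
      apply pv_sorted_rev_group
      · intro p hp
        rw [pv_mem_pyRange_down mv 0 p.2 (by omega)]
        have hp2 : p.2 ∈ vs := List.mem_map_of_mem hp
        exact ⟨by have := hpos p.2 hp2; omega, hub p.2 hp2⟩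
      · exact pv_pairwise_pyRange_down mv 0 (by omega)
    rw [hsorted, PySem.List.foldl_append_eq_flatMap, List.nil_append]
    rw [List.filter_flatMap, List.map_flatMap]
    rw [pv_pyRange_split mv hm1, List.flatMap_append]
    have hlast : List.flatMap (fun c =>
        (((items.filter (fun p => decide (p.2 = c))).filter (fun x => decide (1 < x.2))).map
          (fun x => x.1))) [1] = [] := by
      simp only [List.flatMap_cons, List.flatMap_nil, List.append_nil]
      rw [pv_filter_filter_key]
      simp
    rw [hlast, List.append_nil]
    apply List.flatMap_congr
    intro c hc
    have hc2 : 1 < c ∧ c ≤ mv := (pv_mem_pyRange_down mv 1 c (by omega)).mp hc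
    rw [pv_filter_filter_key, if_pos hc2.1, hBget]
    exact congrArg _ (List.filter_congr (fun p _ => (Bool.beq_eq_decide_eq p.2 c).symm))
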